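-- pv_equiv track=rewrite | github.com/datndd260897/CS514 | hw3-sol/nbest.py | nbestc
-- ===== SOURCE A (Python) =====
-- import heapq
--
-- def nbestc(a, b): # default (symmetric) solution from (0, 0)
--     def put(i, j):
--         if i < n and j < n and (i, j) not in used:
--             used.add((i, j))
--             heapq.heappush(h, (a[i]+b[j], b[j], i, j)) # compare sum first, then 2nd dimension
--
--     a.sort()
--     b.sort()
--     n = len(a)
--     h, used = [], set()
--     result = []
--
--     put(0, 0)
--     for _ in range(n):
--         _, _, i, j = heapq.heappop(h)
--         result.append((a[i], b[j]))
--         put(i+1, j)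
--         put(i, j+1)
--     return result
-- ===== SOURCE B (Python) =====
-- def nbestc(a, b):
--     # simpler: sort all n*n key tuples once and take the first n
--     a.sort()
--     b.sort()
--     n = len(a)
--     cells = sorted((a[i] + b[j], b[j], i, j) for i in range(n) for j in range(n))
--     return [(a[i], b[j]) for _, _, i, j in cells[:n]]
-- ===== Notes on version B (the rewrite author's own statement) =====
-- stated objective: simpler
-- what changed: Replaced the best-first heap expansion from (0,0) with a used-set by sorting all n*n key tuples (sum, b[j], i, j) once and taking the first n.
-- outside the precondition, e.g. on nbestc([1, 2, 3], [0, 100]): A returns [(1, 0), (2, 0), (3, 0)], B raises IndexError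
import Mathlib
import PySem

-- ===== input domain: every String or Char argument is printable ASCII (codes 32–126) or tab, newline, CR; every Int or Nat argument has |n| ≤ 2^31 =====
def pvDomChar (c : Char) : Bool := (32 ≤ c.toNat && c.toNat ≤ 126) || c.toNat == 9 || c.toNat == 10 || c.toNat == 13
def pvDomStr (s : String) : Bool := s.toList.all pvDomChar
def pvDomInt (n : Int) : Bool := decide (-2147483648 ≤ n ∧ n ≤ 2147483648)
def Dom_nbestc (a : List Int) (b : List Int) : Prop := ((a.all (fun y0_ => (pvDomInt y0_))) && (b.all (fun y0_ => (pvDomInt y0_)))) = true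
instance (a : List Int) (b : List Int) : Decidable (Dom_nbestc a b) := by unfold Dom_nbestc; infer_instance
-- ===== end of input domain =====

-- B replaces A's best-first heap expansion from (0,0) with one sort of all n*n key
-- tuples followed by take n (objective: simpler).  Python's A and B both sort the
-- argument lists in place; the equivalence proved here is about the return value.

-- ===== PORT A =====
-- Heap entries are Python's tuples (a[i]+b[j], b[j], i, j); indices kept as Nat
-- (they are non-negative in both programs, comparisons coincide with Python's int).
-- Python's tuple '<' (lexicographic), exact for these 4-tuples of ints:
def kltb : (Int × Int × Nat × Nat) → (Int × Int × Nat × Nat) → Bool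
  | (s, u, i, j), (s', u', i', j') =>
    s < s' || (s = s' && (u < u' || (u = u' && (i < i' || (i = i' && j < j')))))

-- the key tuple pushed for cell (i, j) (a[i]+b[j], b[j], i, j); shared literal expression
def keyOf (aS bS : List Int) (i j : Nat) : Int × Int × Nat × Nat :=
  (aS.getD i 0 + bS.getD j 0, bS.getD j 0, i, j)

-- heapq modelled as min-extraction from the list of pushed entries: exact here because
-- the program only pushes/pops, and all pushed entries are distinct totally-ordered
-- tuples (the (i,j) components are pushed at most once thanks to 'used'), so heappop's
-- result — the unique minimum — does not depend on the heap's internal array layout.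
def popMin (h : List (Int × Int × Nat × Nat)) :
    Option ((Int × Int × Nat × Nat) × List (Int × Int × Nat × Nat)) :=
  match h with
  | [] => none
  | x :: t =>
    let m := t.foldl (fun m y => if kltb y m then y else m) x
    some (m, (x :: t).erase m)

-- 'def put(i, j)': guard in Python's order, push + add to 'used'
def putA (n : Nat) (aS bS : List Int) (i j : Nat)
    (st : List (Int × Int × Nat × Nat) × PySem.Set (Nat × Nat)) :
    List (Int × Int × Nat × Nat) × PySem.Set (Nat × Nat) :=
  if i < n ∧ j < n ∧ (i, j) ∉ st.2 then
    (st.1 ++ [keyOf aS bS i j], PySem.Set.add st.2 (i, j))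
  else st

-- one iteration of 'for _ in range(n)': heappop, append (a[i], b[j]), put(i+1,j), put(i,j+1)
def stepA (n : Nat) (aS bS : List Int)
    (st : List (Int × Int × Nat × Nat) × PySem.Set (Nat × Nat) × List (Int × Int)) :
    List (Int × Int × Nat × Nat) × PySem.Set (Nat × Nat) × List (Int × Int) :=
  match popMin st.1 with
  | none => st  -- unreachable under Pre_ (Python would raise IndexError)
  | some md =>
    let i := md.1.2.2.1
    let j := md.1.2.2.2
    let st1 := putA n aS bS (i + 1) j (md.2, st.2.1)
    let st2 := putA n aS bS i (j + 1) st1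
    (st2.1, st2.2, st.2.2 ++ [(aS.getD i 0, bS.getD j 0)])

def nbestc (a : List Int) (b : List Int) : List (Int × Int) :=
  let aS := PySem.List.sorted a (fun x => x) false   -- a.sort()
  let bS := PySem.List.sorted b (fun x => x) false   -- b.sort()
  let n := aS.length
  let st0 := putA n aS bS 0 0 ([], PySem.Set.empty)  -- put(0, 0)
  ((stepA n aS bS)^[n] (st0.1, st0.2, [])).2.2

-- ===== PORT B =====
-- sorted(...) on the distinct 4-tuples, ported as Mathlib's insertionSort by Python's
-- tuple '≤' (stability is irrelevant: the tuples are pairwise distinct)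
def sortK (l : List (Int × Int × Nat × Nat)) : List (Int × Int × Nat × Nat) :=
  List.insertionSort (fun x y => kltb y x = false) l

-- the generator ((a[i]+b[j], b[j], i, j) for i in range(n) for j in range(n))
def cellsL (aS bS : List Int) (n : Nat) : List (Int × Int × Nat × Nat) :=
  (List.range n).flatMap (fun i => (List.range n).map (fun j => keyOf aS bS i j))

def nbestc_alt (a : List Int) (b : List Int) : List (Int × Int) :=
  let aS := PySem.List.sorted a (fun x => x) false
  let bS := PySem.List.sorted b (fun x => x) false
  let n := aS.length
  ((sortK (cellsL aS bS n)).take n).map (fun k => (aS.getD k.2.2.1 0, bS.getD k.2.2.2 0))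

-- ===== PRECONDITION & SPEC =====
-- Pre_ keeps the task's natural domain: at least as many b's as a's.  With a shorter
-- (non-empty vs a) b, A indexes b out of range: it usually raises IndexError, and when
-- its frontier happens not to touch the missing columns it returns a truncated-grid
-- value that is an artefact of the traversal; B raises IndexError there.
def Pre_nbestc (a : List Int) (b : List Int) : Prop := a.length ≤ b.length
instance (a : List Int) (b : List Int) : Decidable (Pre_nbestc a b) := by unfold Pre_nbestc; infer_instance

def pvWitness_nbestc : List Int × List Int := ([2, 1], [3, 0])

def Spec_nbestc (a : List Int) (b : List Int) (out : List (Int × Int)) : Prop := out = nbestc_alt a b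
instance (a : List Int) (b : List Int) (out : List (Int × Int)) : Decidable (Spec_nbestc a b out) := by unfold Spec_nbestc; infer_instance

-- ===== CLAIM (what is proved, stated in full; the proofs are below) =====
def Claim_equal_nbestc : Prop := ∀ (a : List Int) (b : List Int), Dom_nbestc a b → Pre_nbestc a b → Spec_nbestc a b (nbestc a b)

-- ===== LEMMAS AND PROOFS =====

-- ---- order lemmas for kltb ----
theorem kltb_irrefl (x : Int × Int × Nat × Nat) : kltb x x = false := by
  obtain ⟨s, u, i, j⟩ := x; simp [kltb]

theorem kltb_trans {x y z : Int × Int × Nat × Nat}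
    (h1 : kltb x y = true) (h2 : kltb y z = true) : kltb x z = true := by
  obtain ⟨s1, u1, i1, j1⟩ := x; obtain ⟨s2, u2, i2, j2⟩ := y; obtain ⟨s3, u3, i3, j3⟩ := z
  simp [kltb] at h1 h2 ⊢; omega

theorem kltb_conn {x y : Int × Int × Nat × Nat} (h : x ≠ y) :
    kltb x y = true ∨ kltb y x = true := by
  obtain ⟨s1, u1, i1, j1⟩ := x; obtain ⟨s2, u2, i2, j2⟩ := y
  simp [kltb]; simp [Prod.ext_iff] at h; omega

theorem kltb_asymm {x y : Int × Int × Nat × Nat} (h : kltb x y = true) : kltb y x = false := by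
  obtain ⟨s1, u1, i1, j1⟩ := x; obtain ⟨s2, u2, i2, j2⟩ := y
  simp [kltb] at h ⊢; omega

-- ---- popMin characterization ----
theorem foldlMin_mem (t : List (Int × Int × Nat × Nat)) (x : Int × Int × Nat × Nat) :
    (t.foldl (fun m y => if kltb y m then y else m) x) ∈ x :: t := by
  induction t generalizing x with
  | nil => simp
  | cons z t ih =>
    simp only [List.foldl_cons]
    by_cases hzx : kltb z x = true
    · rw [if_pos hzx]
      rcases List.mem_cons.1 (ih z) with h | h <;> simp [h]
    · rw [if_neg hzx]
      rcases List.mem_cons.1 (ih x) with h | h <;> simp [h]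

theorem foldlMin_min : ∀ (t : List (Int × Int × Nat × Nat)) (x : Int × Int × Nat × Nat),
    ∀ y ∈ x :: t, kltb y (t.foldl (fun m y => if kltb y m then y else m) x) = false := by
  intro t
  induction t with
  | nil =>
    intro x y hy
    simp at hy; subst hy; exact kltb_irrefl _
  | cons z t ih =>
    intro x y hy
    simp only [List.foldl_cons]
    by_cases hzx : kltb z x = true
    · rw [if_pos hzx]
      rcases List.mem_cons.1 hy with h | hy'
      · by_contra hcon
        simp only [Bool.not_eq_false] at hcon
        have h2 := ih z z List.mem_cons_self
        have h3 := kltb_trans hzx (h ▸ hcon)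
        simp [h3] at h2
      · exact ih z y hy'
    · rw [if_neg hzx]
      rcases List.mem_cons.1 hy with h | hy'
      · exact h ▸ ih x x List.mem_cons_self
      · rcases List.mem_cons.1 hy' with h | hy''
        · subst h
          by_contra hcon
          simp only [Bool.not_eq_false] at hcon
          rcases eq_or_ne y x with he | hne
          · have h2 := ih x x List.mem_cons_self
            rw [he] at hcon; simp [hcon] at h2
          · rcases kltb_conn hne with hc | hc
            · exact hzx hc
            · have h2 := ih x x List.mem_cons_self
              have h3 := kltb_trans hc hcon
              simp [h3] at h2
        · exact ih x y (List.mem_cons_of_mem x hy'')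

theorem popMin_spec (h : List (Int × Int × Nat × Nat)) (hne : h ≠ []) :
    ∃ m, popMin h = some (m, h.erase m) ∧ m ∈ h ∧ ∀ y ∈ h, kltb y m = false := by
  match h with
  | [] => exact absurd rfl hne
  | x :: t =>
    refine ⟨t.foldl (fun m y => if kltb y m then y else m) x, rfl, foldlMin_mem t x, ?_⟩
    exact fun y hy => foldlMin_min t x y hy

-- if k is in h and nothing in h is below it, the pop returns exactly k
theorem popMin_eq_of_min {h : List (Int × Int × Nat × Nat)} {k : Int × Int × Nat × Nat}
    (hk : k ∈ h) (hmin : ∀ y ∈ h, kltb y k = false) :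
    popMin h = some (k, h.erase k) := by
  obtain ⟨m, hpop, hm, hmmin⟩ := popMin_spec h (by rintro rfl; simp at hk)
  have hmk : m = k := by
    by_contra hne
    rcases kltb_conn hne with hc | hc
    · simp [hmin m hm] at hc
    · simp [hmmin k hk] at hc
  rw [hmk] at hpop
  exact hpop

-- ---- keyOf / cellsL basics ----
theorem keyOf_inj {aS bS : List Int} {i j i' j' : Nat}
    (h : keyOf aS bS i j = keyOf aS bS i' j') : i = i' ∧ j = j' := by
  simp [keyOf, Prod.ext_iff] at h; exact ⟨h.2.2.1, h.2.2.2⟩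

theorem mem_cellsL {aS bS : List Int} {n : Nat} {k : Int × Int × Nat × Nat} :
    k ∈ cellsL aS bS n ↔ ∃ i j, i < n ∧ j < n ∧ k = keyOf aS bS i j := by
  simp only [cellsL, List.mem_flatMap, List.mem_map, List.mem_range]
  constructor
  · rintro ⟨i, hi, j, hj, rfl⟩; exact ⟨i, j, hi, hj, rfl⟩
  · rintro ⟨i, j, hi, hj, rfl⟩; exact ⟨i, hi, j, hj, rfl⟩

theorem nodup_cellsL (aS bS : List Int) (n : Nat) : (cellsL aS bS n).Nodup := by
  have : cellsL aS bS n = (List.range n ×ˢ List.range n).map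
      (fun p => keyOf aS bS p.1 p.2) := by
    simp only [cellsL, SProd.sprod, List.product, List.flatMap_def, List.map_flatten,
      List.map_map]
    exact congrArg List.flatten (List.map_congr_left (fun i _ => by
      simp [List.map_map, Function.comp]))
  rw [this]
  refine List.Nodup.map ?_ (List.Nodup.product (List.nodup_range) (List.nodup_range))
  intro p q hpq
  obtain ⟨h1, h2⟩ := keyOf_inj hpq
  exact Prod.ext h1 h2

-- ---- sortK basics ----
theorem sortK_perm (l : List (Int × Int × Nat × Nat)) : (sortK l).Perm l :=
  List.perm_insertionSort _ l

theorem sortK_pairwise (l : List (Int × Int × Nat × Nat)) :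
    (sortK l).Pairwise (fun x y => kltb y x = false) := by
  haveI : Std.Total (fun (x y : Int × Int × Nat × Nat) => kltb y x = false) := by
    constructor; intro x y
    by_cases h : kltb y x = true
    · exact Or.inr (kltb_asymm h)
    · exact Or.inl (by simpa using h)
  haveI : IsTrans (Int × Int × Nat × Nat) (fun x y => kltb y x = false) := by
    constructor; intro x y z h1 h2
    by_contra hc
    have hzx : kltb z x = true := by simpa using hc
    rcases eq_or_ne x y with rfl | hne
    · simp [hzx] at h2
    · rcases kltb_conn hne with hc2 | hc2
      · have h3 := kltb_trans hzx hc2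
        simp [h3] at h2
      · simp [hc2] at h1
  exact List.sorted_insertionSort _ l

-- ===== the frontier invariant =====
-- Throughout, aS bS are the sorted arrays, n = aS.length ≤ bS.length,
-- S = sortK (cellsL aS bS n) the key tuples in increasing order, P t = S.take t the
-- popped prefix, and U t the cells Python's 'used' holds after t pops.
def Ut (aS bS : List Int) (n t : Nat) (i j : Nat) : Prop :=
  i < n ∧ j < n ∧
    ((i = 0 ∧ j = 0) ∨
     (0 < i ∧ keyOf aS bS (i - 1) j ∈ (sortK (cellsL aS bS n)).take t) ∨
     (0 < j ∧ keyOf aS bS i (j - 1) ∈ (sortK (cellsL aS bS n)).take t))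

def InvA (aS bS : List Int) (n t : Nat)
    (st : List (Int × Int × Nat × Nat) × PySem.Set (Nat × Nat) × List (Int × Int)) : Prop :=
  st.2.2 = ((sortK (cellsL aS bS n)).take t).map
      (fun k => (aS.getD k.2.2.1 0, bS.getD k.2.2.2 0)) ∧
  st.1.Nodup ∧
  (∀ k ∈ st.1, ∃ i j, i < n ∧ j < n ∧ k = keyOf aS bS i j) ∧
  (∀ i j : Nat, keyOf aS bS i j ∈ st.1 ↔
      (Ut aS bS n t i j ∧ keyOf aS bS i j ∉ (sortK (cellsL aS bS n)).take t)) ∧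
  (∀ i j : Nat, (i, j) ∈ st.2.1 ↔ Ut aS bS n t i j) ∧
  (∀ i j : Nat, keyOf aS bS i j ∈ (sortK (cellsL aS bS n)).take t → Ut aS bS n t i j)

-- monotone array access
theorem getD_mono {l : List Int} (hl : l.Pairwise (· ≤ ·)) {p q : Nat}
    (hpq : p ≤ q) (hq : q < l.length) : l.getD p 0 ≤ l.getD q 0 := by
  rcases eq_or_lt_of_le hpq with rfl | hlt
  · exact le_refl _
  · have hp : p < l.length := lt_trans hlt hq
    rw [List.getD_eq_getElem _ _ hp, List.getD_eq_getElem _ _ hq]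
    exact List.pairwise_iff_getElem.1 hl p q hp hq hlt

-- strict key monotonicity along the grid
theorem kltb_key_left {aS bS : List Int} (hA : aS.Pairwise (· ≤ ·))
    {n i j : Nat} (hi : 0 < i) (hin : i < n) (hn : n = aS.length) :
    kltb (keyOf aS bS (i - 1) j) (keyOf aS bS i j) = true := by
  have h1 : aS.getD (i - 1) 0 ≤ aS.getD i 0 :=
    getD_mono hA (Nat.sub_le i 1) (hn ▸ hin)
  simp only [List.getD_eq_getElem?_getD] at h1
  simp [keyOf, kltb]; omega

theorem kltb_key_down {aS bS : List Int} (hB : bS.Pairwise (· ≤ ·))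
    {n i j : Nat} (hj : 0 < j) (hjn : j < n) (hnb : n ≤ bS.length) :
    kltb (keyOf aS bS i (j - 1)) (keyOf aS bS i j) = true := by
  have h1 : bS.getD (j - 1) 0 ≤ bS.getD j 0 :=
    getD_mono hB (Nat.sub_le j 1) (lt_of_lt_of_le hjn hnb)
  simp only [List.getD_eq_getElem?_getD] at h1
  simp [keyOf, kltb]; omega

-- any cell with a strictly smaller key than S[t] is already popped
theorem mem_take_of_kltb {aS bS : List Int} {n t : Nat}
    (ht : t < (sortK (cellsL aS bS n)).length)
    {k : Int × Int × Nat × Nat} (hkC : k ∈ cellsL aS bS n)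
    (hlt : kltb k ((sortK (cellsL aS bS n))[t]) = true) :
    k ∈ (sortK (cellsL aS bS n)).take t := by
  have hkS : k ∈ sortK (cellsL aS bS n) := ((sortK_perm _).mem_iff).2 hkC
  obtain ⟨p, hp, hpk⟩ := List.mem_iff_getElem.1 hkS
  have hplt : p < t := by
    by_contra hge
    push_neg at hge
    rcases eq_or_lt_of_le hge with rfl | hlt2
    · rw [hpk] at hlt; simp [kltb_irrefl] at hlt
    · have := List.pairwise_iff_getElem.1 (sortK_pairwise (cellsL aS bS n)) t p ht hp hlt2
      rw [hpk] at this; simp_all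
  exact List.mem_iff_getElem.2 ⟨p, by simp only [List.length_take, lt_min_iff]; exact ⟨hplt, hp⟩,
    by rw [List.getElem_take]; exact hpk⟩

-- S[t] itself is not yet popped
theorem getElem_not_mem_take {aS bS : List Int} {n t : Nat}
    (ht : t < (sortK (cellsL aS bS n)).length) :
    (sortK (cellsL aS bS n))[t] ∉ (sortK (cellsL aS bS n)).take t := by
  intro hmem
  have hnd : (sortK (cellsL aS bS n)).Nodup :=
    ((sortK_perm _).nodup_iff).2 (nodup_cellsL aS bS n)
  obtain ⟨p, hp, hpk⟩ := List.mem_iff_getElem.1 hmem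
  have hp' : p < t := ((by simpa using hp) : p < t ∧ p < (sortK (cellsL aS bS n)).length).1
  rw [List.getElem_take] at hpk
  have := List.pairwise_iff_getElem.1 hnd p t (lt_trans hp' ht) ht hp'
  exact this hpk

-- ---- putA characterizations ----
theorem keyOf_eq_iff {aS bS : List Int} {p q r s : Nat} :
    keyOf aS bS p q = keyOf aS bS r s ↔ p = r ∧ q = s :=
  ⟨keyOf_inj, by rintro ⟨rfl, rfl⟩; rfl⟩

theorem keyOf_i (aS bS : List Int) (i j : Nat) : (keyOf aS bS i j).2.2.1 = i := rfl
theorem keyOf_j (aS bS : List Int) (i j : Nat) : (keyOf aS bS i j).2.2.2 = j := rfl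

theorem mem_putA_heap {n : Nat} {aS bS : List Int} {i j : Nat}
    {st : List (Int × Int × Nat × Nat) × PySem.Set (Nat × Nat)} {k' : Int × Int × Nat × Nat} :
    k' ∈ (putA n aS bS i j st).1 ↔
      k' ∈ st.1 ∨ (i < n ∧ j < n ∧ (i, j) ∉ st.2 ∧ k' = keyOf aS bS i j) := by
  unfold putA; split_ifs with h
  · simp only [List.mem_append, List.mem_singleton]
    tauto
  · tauto

theorem mem_putA_used {n : Nat} {aS bS : List Int} {i j : Nat}
    {st : List (Int × Int × Nat × Nat) × PySem.Set (Nat × Nat)} {p : Nat × Nat} :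
    p ∈ (putA n aS bS i j st).2 ↔ p ∈ st.2 ∨ (i < n ∧ j < n ∧ p = (i, j)) := by
  unfold putA; split_ifs with h
  · rw [PySem.Set.mem_add]
    tauto
  · constructor
    · exact Or.inl
    · rintro (hp | ⟨h1, h2, rfl⟩)
      · exact hp
      · by_contra hc; exact h ⟨h1, h2, hc⟩

theorem nodup_putA {n : Nat} {aS bS : List Int} {i j : Nat}
    {st : List (Int × Int × Nat × Nat) × PySem.Set (Nat × Nat)}
    (hnd : st.1.Nodup) (hfresh : (i, j) ∉ st.2 → keyOf aS bS i j ∉ st.1) :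
    (putA n aS bS i j st).1.Nodup := by
  unfold putA; split_ifs with h
  · refine List.Nodup.append hnd (List.nodup_singleton _) ?_
    intro x hx hy
    rw [List.mem_singleton] at hy
    exact hfresh h.2.2 (hy ▸ hx)
  · exact hnd

-- ---- take / Ut lemmas ----
theorem take_succ_eq {α : Type} (l : List α) {t : Nat} (ht : t < l.length) :
    l.take (t + 1) = l.take t ++ [l[t]] := by
  rw [List.take_succ, List.getElem?_eq_getElem ht]; rfl

theorem Ut_mono {aS bS : List Int} {n t i j : Nat} (h : Ut aS bS n t i j) :
    Ut aS bS n (t + 1) i j := by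
  unfold Ut at h ⊢
  obtain ⟨h1, h2, h3⟩ := h
  have heq : (sortK (cellsL aS bS n)).take t =
      ((sortK (cellsL aS bS n)).take (t + 1)).take t := by
    rw [List.take_take, Nat.min_eq_left (Nat.le_succ t)]
  have hsub : ∀ x ∈ (sortK (cellsL aS bS n)).take t,
      x ∈ (sortK (cellsL aS bS n)).take (t + 1) := by
    intro x hx
    rw [heq] at hx
    exact List.take_subset _ _ hx
  refine ⟨h1, h2, ?_⟩
  rcases h3 with h3 | ⟨h4, h5⟩ | ⟨h4, h5⟩
  · exact Or.inl h3
  · exact Or.inr (Or.inl ⟨h4, hsub _ h5⟩)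
  · exact Or.inr (Or.inr ⟨h4, hsub _ h5⟩)

theorem Ut_succ {aS bS : List Int} {n t i j : Nat}
    (htS : t < (sortK (cellsL aS bS n)).length)
    (hk : (sortK (cellsL aS bS n))[t] = keyOf aS bS i j) (i' j' : Nat) :
    Ut aS bS n (t + 1) i' j' ↔ Ut aS bS n t i' j' ∨
      (i' < n ∧ j' < n ∧ ((i' = i + 1 ∧ j' = j) ∨ (i' = i ∧ j' = j + 1))) := by
  unfold Ut
  rw [take_succ_eq _ htS, hk]
  simp only [List.mem_append, List.mem_singleton]
  constructor
  · rintro ⟨h1, h2, h3⟩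
    rcases h3 with h3 | ⟨hi0, h4 | h4⟩ | ⟨hj0, h4 | h4⟩
    · exact Or.inl ⟨h1, h2, Or.inl h3⟩
    · exact Or.inl ⟨h1, h2, Or.inr (Or.inl ⟨hi0, h4⟩)⟩
    · obtain ⟨e1, e2⟩ := keyOf_inj h4
      exact Or.inr ⟨h1, h2, Or.inl ⟨by omega, e2⟩⟩
    · exact Or.inl ⟨h1, h2, Or.inr (Or.inr ⟨hj0, h4⟩)⟩
    · obtain ⟨e1, e2⟩ := keyOf_inj h4
      exact Or.inr ⟨h1, h2, Or.inr ⟨e1, by omega⟩⟩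
  · rintro (⟨h1, h2, h3⟩ | ⟨h1, h2, h3 | h3⟩)
    · refine ⟨h1, h2, ?_⟩
      rcases h3 with h3 | ⟨h4, h5⟩ | ⟨h4, h5⟩
      · exact Or.inl h3
      · exact Or.inr (Or.inl ⟨h4, Or.inl h5⟩)
      · exact Or.inr (Or.inr ⟨h4, Or.inl h5⟩)
    · obtain ⟨rfl, rfl⟩ := h3
      refine ⟨h1, h2, Or.inr (Or.inl ⟨by omega, Or.inr ?_⟩)⟩
      simp
    · obtain ⟨rfl, rfl⟩ := h3
      refine ⟨h1, h2, Or.inr (Or.inr ⟨by omega, Or.inr ?_⟩)⟩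
      simp

theorem length_sortK_cells (aS bS : List Int) (n : Nat) :
    (sortK (cellsL aS bS n)).length = n * n := by
  rw [(sortK_perm _).length_eq]
  simp [cellsL]

-- ---- the step lemma: one loop iteration advances the invariant ----
theorem invA_step (aS bS : List Int) (hA : aS.Pairwise (· ≤ ·)) (hB : bS.Pairwise (· ≤ ·))
    (hn : aS.length ≤ bS.length) (t : Nat) (ht : t < aS.length)
    (st : List (Int × Int × Nat × Nat) × PySem.Set (Nat × Nat) × List (Int × Int))
    (hInv : InvA aS bS aS.length t st) :
    InvA aS bS aS.length (t + 1) (stepA aS.length aS bS st) := by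
  obtain ⟨hres, hnd, hcells, hheap, hused, hpopU⟩ := hInv
  have htS : t < (sortK (cellsL aS bS aS.length)).length := by
    rw [length_sortK_cells]
    calc t < aS.length := ht
      _ ≤ aS.length * aS.length := Nat.le_mul_of_pos_left _ (by omega)
  obtain ⟨i, j, hi, hj, hk⟩ := mem_cellsL.1 ((sortK_perm _).subset (List.getElem_mem htS))
  have hknp := getElem_not_mem_take (aS := aS) (bS := bS) htS
  rw [hk] at hknp
  have hUt : Ut aS bS aS.length t i j := by
    refine ⟨hi, hj, ?_⟩
    by_cases hi0 : 0 < i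
    · refine Or.inr (Or.inl ⟨hi0, ?_⟩)
      refine mem_take_of_kltb htS (mem_cellsL.2 ⟨i - 1, j, by omega, hj, rfl⟩) ?_
      rw [hk]
      exact kltb_key_left hA hi0 hi rfl
    · by_cases hj0 : 0 < j
      · refine Or.inr (Or.inr ⟨hj0, ?_⟩)
        refine mem_take_of_kltb htS (mem_cellsL.2 ⟨i, j - 1, hi, by omega, rfl⟩) ?_
        rw [hk]
        exact kltb_key_down hB hj0 hj hn
      · exact Or.inl ⟨by omega, by omega⟩
  have hkheap : keyOf aS bS i j ∈ st.1 := (hheap i j).2 ⟨hUt, hknp⟩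
  have hmin : ∀ y ∈ st.1, kltb y (keyOf aS bS i j) = false := by
    intro y hy
    obtain ⟨i', j', hi', hj', rfl⟩ := hcells y hy
    have hy2 := (hheap i' j').1 hy
    by_contra hcon
    simp only [Bool.not_eq_false] at hcon
    exact hy2.2 (mem_take_of_kltb htS (mem_cellsL.2 ⟨i', j', hi', hj', rfl⟩)
      (by rw [hk]; exact hcon))
  have hpop : popMin st.1 = some (keyOf aS bS i j, st.1.erase (keyOf aS bS i j)) :=
    popMin_eq_of_min hkheap hmin
  have hmem_erase : ∀ k', k' ∈ st.1.erase (keyOf aS bS i j) ↔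
      k' ≠ keyOf aS bS i j ∧ k' ∈ st.1 := fun k' => hnd.mem_erase_iff
  -- the combined heap/used after the two puts
  have hputmem : ∀ k',
      k' ∈ (putA aS.length aS bS i (j + 1)
              (putA aS.length aS bS (i + 1) j (st.1.erase (keyOf aS bS i j), st.2.1))).1 ↔
        (k' ∈ st.1.erase (keyOf aS bS i j)
          ∨ (i + 1 < aS.length ∧ j < aS.length ∧ (i + 1, j) ∉ st.2.1 ∧ k' = keyOf aS bS (i + 1) j)
          ∨ (i < aS.length ∧ j + 1 < aS.length ∧ (i, j + 1) ∉ st.2.1 ∧ k' = keyOf aS bS i (j + 1))) := by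
    intro k'
    rw [mem_putA_heap, mem_putA_heap]
    have h2 : ((i, j + 1) ∈ (putA aS.length aS bS (i + 1) j
        (st.1.erase (keyOf aS bS i j), st.2.1)).2) ↔ (i, j + 1) ∈ st.2.1 := by
      rw [mem_putA_used]
      constructor
      · rintro (h | ⟨_, _, he⟩)
        · exact h
        · exact absurd (congrArg Prod.fst he) (by simp)
      · exact Or.inl
    rw [h2]
    tauto
  have hputused : ∀ p : Nat × Nat,
      p ∈ (putA aS.length aS bS i (j + 1)
            (putA aS.length aS bS (i + 1) j (st.1.erase (keyOf aS bS i j), st.2.1))).2 ↔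
        (p ∈ st.2.1 ∨ (i + 1 < aS.length ∧ j < aS.length ∧ p = (i + 1, j))
          ∨ (i < aS.length ∧ j + 1 < aS.length ∧ p = (i, j + 1))) := by
    intro p
    rw [mem_putA_used, mem_putA_used]
    tauto
  -- freshness of the pushed entries
  have hfresh1 : (i + 1, j) ∉ st.2.1 → keyOf aS bS (i + 1) j ∉ st.1.erase (keyOf aS bS i j) := by
    intro hnu hmem
    rw [hmem_erase] at hmem
    exact hnu ((hused _ _).2 ((hheap _ _).1 hmem.2).1)
  have hfresh2 : (i, j + 1) ∉ st.2.1 → keyOf aS bS i (j + 1) ∉ st.1.erase (keyOf aS bS i j) := by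
    intro hnu hmem
    rw [hmem_erase] at hmem
    exact hnu ((hused _ _).2 ((hheap _ _).1 hmem.2).1)
  have hndE : (st.1.erase (keyOf aS bS i j)).Nodup := hnd.erase _
  have hnd2 : (putA aS.length aS bS i (j + 1)
      (putA aS.length aS bS (i + 1) j (st.1.erase (keyOf aS bS i j), st.2.1))).1.Nodup := by
    refine nodup_putA (nodup_putA hndE hfresh1) ?_
    intro hnu hmem
    rw [mem_putA_heap] at hmem
    have hnu' : (i, j + 1) ∉ st.2.1 := by
      intro hc
      exact hnu (mem_putA_used.2 (Or.inl hc))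
    rcases hmem with h | ⟨_, _, _, he⟩
    · exact hfresh2 hnu' h
    · exact absurd (keyOf_inj he).1 (by omega)
  -- unfold one step
  simp only [stepA, hpop, keyOf_i, keyOf_j]
  refine ⟨?_, hnd2, ?_, ?_, ?_, ?_⟩
  · -- result
    rw [take_succ_eq _ htS, hk, List.map_append, ← hres]
    rfl
  · -- heap holds only grid keys
    intro k' hk'
    rw [hputmem] at hk'
    rcases hk' with h | ⟨h1, h2, _, rfl⟩ | ⟨h1, h2, _, rfl⟩
    · exact hcells k' (List.erase_subset h)
    · exact ⟨i + 1, j, h1, h2, rfl⟩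
    · exact ⟨i, j + 1, h1, h2, rfl⟩
  · -- heap membership characterization at t+1
    intro i' j'
    rw [hputmem, hmem_erase, Ut_succ htS hk]
    have htake : keyOf aS bS i' j' ∈ (sortK (cellsL aS bS aS.length)).take (t + 1) ↔
        (keyOf aS bS i' j' ∈ (sortK (cellsL aS bS aS.length)).take t ∨
          keyOf aS bS i' j' = keyOf aS bS i j) := by
      rw [take_succ_eq _ htS, hk]
      simp
    constructor
    · rintro (⟨hne, hmem⟩ | ⟨h1, h2, h3, he⟩ | ⟨h1, h2, h3, he⟩)
      · obtain ⟨hU, hnt⟩ := (hheap i' j').1 hmem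
        refine ⟨Or.inl hU, ?_⟩
        rw [htake]
        rintro (h | h)
        · exact hnt h
        · exact hne h
      · obtain ⟨e1, e2⟩ := keyOf_eq_iff.1 he
        refine ⟨Or.inr ⟨by omega, by omega, Or.inl ⟨e1, e2⟩⟩, ?_⟩
        rw [htake]
        rintro (h | h)
        · exact h3 ((hused _ _).2 (hpopU _ _ (he ▸ h)))
        · have := keyOf_eq_iff.1 (he.symm.trans h)
          omega
      · obtain ⟨e1, e2⟩ := keyOf_eq_iff.1 he
        refine ⟨Or.inr ⟨by omega, by omega, Or.inr ⟨e1, e2⟩⟩, ?_⟩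
        rw [htake]
        rintro (h | h)
        · exact h3 ((hused _ _).2 (hpopU _ _ (he ▸ h)))
        · have := keyOf_eq_iff.1 (he.symm.trans h)
          omega
    · rintro ⟨hU, hnt⟩
      rw [htake] at hnt
      push_neg at hnt
      obtain ⟨hnt1, hne⟩ := hnt
      rcases hU with hU | ⟨h1, h2, ⟨e1, e2⟩ | ⟨e1, e2⟩⟩
      · exact Or.inl ⟨hne, (hheap i' j').2 ⟨hU, hnt1⟩⟩
      · by_cases hu : (i + 1, j) ∈ st.2.1
        · have hu' : (i', j') ∈ st.2.1 := by rw [e1, e2]; exact hu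
          exact Or.inl ⟨hne, (hheap _ _).2 ⟨(hused _ _).1 hu', hnt1⟩⟩
        · exact Or.inr (Or.inl ⟨by omega, by omega, hu, by rw [e1, e2]⟩)
      · by_cases hu : (i, j + 1) ∈ st.2.1
        · have hu' : (i', j') ∈ st.2.1 := by rw [e1, e2]; exact hu
          exact Or.inl ⟨hne, (hheap _ _).2 ⟨(hused _ _).1 hu', hnt1⟩⟩
        · exact Or.inr (Or.inr ⟨by omega, by omega, hu, by rw [e1, e2]⟩)
  · -- used characterization at t+1
    intro i' j'
    rw [hputused, Ut_succ htS hk]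
    constructor
    · rintro (h | ⟨h1, h2, he⟩ | ⟨h1, h2, he⟩)
      · exact Or.inl ((hused _ _).1 h)
      · injection he with e1 e2
        exact Or.inr ⟨by omega, by omega, Or.inl ⟨e1, e2⟩⟩
      · injection he with e1 e2
        exact Or.inr ⟨by omega, by omega, Or.inr ⟨e1, e2⟩⟩
    · rintro (h | ⟨h1, h2, ⟨e1, e2⟩ | ⟨e1, e2⟩⟩)
      · exact Or.inl ((hused _ _).2 h)
      · exact Or.inr (Or.inl ⟨by omega, by omega, by rw [e1, e2]⟩)
      · exact Or.inr (Or.inr ⟨by omega, by omega, by rw [e1, e2]⟩)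
  · -- popped cells are used
    intro i' j' hmem
    rw [take_succ_eq _ htS, hk] at hmem
    rcases List.mem_append.1 hmem with h | h
    · exact Ut_mono (hpopU _ _ h)
    · rw [List.mem_singleton] at h
      obtain ⟨e1, e2⟩ := keyOf_eq_iff.1 h
      rw [e1, e2]
      exact Ut_mono hUt

-- the main induction: after t pops the state satisfies InvA t
theorem invA_iterate (aS bS : List Int) (hA : aS.Pairwise (· ≤ ·)) (hB : bS.Pairwise (· ≤ ·))
    (hn : aS.length ≤ bS.length) :
    ∀ t, t ≤ aS.length →
      InvA aS bS aS.length t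
        ((stepA aS.length aS bS)^[t]
          ((putA aS.length aS bS 0 0 ([], PySem.Set.empty)).1,
           (putA aS.length aS bS 0 0 ([], PySem.Set.empty)).2, [])) := by
  intro t
  induction t with
  | zero =>
    intro _
    rw [Function.iterate_zero_apply]
    refine ⟨by simp, nodup_putA List.nodup_nil (fun _ => by simp), ?_, ?_, ?_, ?_⟩
    · intro k' hk'
      rw [mem_putA_heap] at hk'
      rcases hk' with h | ⟨h1, h2, _, rfl⟩
      · simp at h
      · exact ⟨0, 0, h1, h2, rfl⟩
    · intro i' j'
      rw [mem_putA_heap]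
      constructor
      · rintro (h | ⟨h1, h2, _, he⟩)
        · simp at h
        · obtain ⟨rfl, rfl⟩ := keyOf_eq_iff.1 he
          exact ⟨⟨h1, h2, Or.inl ⟨rfl, rfl⟩⟩, by simp⟩
      · rintro ⟨⟨h1, h2, h3⟩, -⟩
        rcases h3 with ⟨rfl, rfl⟩ | ⟨_, h4⟩ | ⟨_, h4⟩
        · exact Or.inr ⟨h1, h2, by simp [PySem.Set.empty], rfl⟩
        · simp at h4
        · simp at h4
    · intro i' j'
      rw [mem_putA_used]
      constructor
      · rintro (h | ⟨h1, h2, he⟩)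
        · simp [PySem.Set.empty] at h
        · injection he with e1 e2
          exact ⟨by omega, by omega, Or.inl ⟨e1, e2⟩⟩
      · rintro ⟨h1, h2, h3⟩
        rcases h3 with ⟨rfl, rfl⟩ | ⟨_, h4⟩ | ⟨_, h4⟩
        · exact Or.inr ⟨h1, h2, rfl⟩
        · simp at h4
        · simp at h4
    · intro i' j' h
      simp at h
  | succ t ih =>
    intro hts
    rw [Function.iterate_succ_apply']
    exact invA_step aS bS hA hB hn t (by omega) _ (ih (by omega))

-- ===== VERDICT (by name: the statement is the Claim_ definition above) =====
theorem nbestc_spec : Claim_equal_nbestc := by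
  unfold Claim_equal_nbestc
  intro a b _ hPre
  unfold Pre_nbestc at hPre
  unfold Spec_nbestc nbestc nbestc_alt
  have hA := PySem.List.sorted_pairwise a (fun x => x)
  have hB := PySem.List.sorted_pairwise b (fun x => x)
  have hlen : (PySem.List.sorted a (fun x => x) false).length ≤
      (PySem.List.sorted b (fun x => x) false).length := by
    rw [PySem.List.length_sorted, PySem.List.length_sorted]
    exact hPre
  exact (invA_iterate _ _ hA hB hlen _ le_rfl).1
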